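-- pv_equiv track=rewrite | github.com/Wwestmoon/TALON | talon/agent/agent_sc.py | find_most_frequent_tool_index
-- ===== SOURCE A (Python) =====
-- from collections import Counter
--
-- def find_most_frequent_tool_index(tools_list):
--     # Step 1: 过滤掉空列表 []，并统计非空子列表中的 tool 频率
--     valid_sublists = [sublist for sublist in tools_list if sublist]  # 跳过 []
--     if not valid_sublists:  # 如果全是空列表，返回 None
--         return None
--
--     all_tools = [tool for sublist in valid_sublists for tool in sublist]
--     tool_counter = Counter(all_tools)
--     max_count = max(tool_counter.values())
--     most_common_tools = [tool for tool, count in tool_counter.items() if count == max_count]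
--
--     # Step 2: 在原始列表中，找到包含高频 tool 的非空子列表
--     candidate_indices = []
--     for idx, sublist in enumerate(tools_list):
--         if not sublist:  # 跳过空列表 []
--             continue
--         for tool in most_common_tools:
--             if tool in sublist:
--                 candidate_indices.append((idx, len(sublist)))
--                 break  # 避免重复添加
--
--     # Step 3: 按子列表长度和索引选择
--     if not candidate_indices:
--         return None
--
--     candidate_indices.sort(key=lambda x: (-x[1], x[0]))  # 长度降序，索引升序
--     return candidate_indices[0][0]
-- ===== SOURCE B (Python) =====
-- from collections import Counter
--
-- def find_most_frequent_tool_index(tools_list):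
--     # One pass: Counter + running argmax; no most_common list, no candidate sort.
--     counter = Counter(t for sub in tools_list if sub for t in sub)
--     if len(counter) == 0:
--         return None
--     max_count = max(counter.values())
--     best_idx, best_len = None, -1
--     for idx, sub in enumerate(tools_list):
--         if not sub:
--             continue
--         m = max(counter[t] for t in sub)
--         if m == max_count and len(sub) > best_len:
--             best_idx, best_len = idx, len(sub)
--     return best_idx
-- ===== Notes on version B (the rewrite author's own statement) =====
-- stated objective: simpler
-- what changed: Drops the most-common-tools list and the candidate-collection-then-sort: one enumerate pass compares each non-empty sublist's maximum tool count with the Counter's global maximum and keeps a running (longest, first) best index.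
import Mathlib
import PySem

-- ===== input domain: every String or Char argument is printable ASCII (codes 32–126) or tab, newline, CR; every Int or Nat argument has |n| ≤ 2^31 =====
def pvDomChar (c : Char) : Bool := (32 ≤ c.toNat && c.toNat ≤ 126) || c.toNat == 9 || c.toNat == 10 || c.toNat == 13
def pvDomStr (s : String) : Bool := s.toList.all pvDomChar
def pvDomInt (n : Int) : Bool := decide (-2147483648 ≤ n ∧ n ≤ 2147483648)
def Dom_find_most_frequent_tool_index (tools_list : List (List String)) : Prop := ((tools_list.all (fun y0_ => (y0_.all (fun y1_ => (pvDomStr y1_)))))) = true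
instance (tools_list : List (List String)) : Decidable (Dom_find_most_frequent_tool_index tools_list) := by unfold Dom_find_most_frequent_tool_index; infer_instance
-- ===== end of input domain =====

-- B replaces A's most-common-tools list and candidate-collection-then-sort by a single
-- running argmax pass (per-sublist count maximum compared with the global maximum); objective: simpler.


-- ===== PORT A =====
def find_most_frequent_tool_index (tools_list : List (List String)) : Option Int :=
  let valid_sublists := tools_list.filter (fun sublist => !sublist.isEmpty)
  if valid_sublists.isEmpty then none
  else
    let all_tools := valid_sublists.flatten
    let tool_counter := PySem.Dict.counter all_tools
    match PySem.List.max? (PySem.Dict.values tool_counter) (fun v => v) with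
    | none => none  -- unreachable: all_tools ≠ [] here, so values ≠ [] (Python max would raise only on empty)
    | some max_count =>
      let most_common_tools :=
        ((PySem.Dict.items tool_counter).filter (fun p => p.2 == max_count)).map (fun p => p.1)
      let candidate_indices := (PySem.List.enumerate tools_list 0).foldl
        (fun acc p =>
          if p.2.isEmpty then acc
          else if most_common_tools.any (fun tool => p.2.contains tool) then
            acc ++ [(p.1, PySem.List.len p.2)]
          else acc) []
      if candidate_indices.isEmpty then none
      else
        match PySem.List.sorted2 candidate_indices (fun x => -x.2) (fun x => x.1) false with
        | [] => none  -- unreachable: permutation of a non-empty list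
        | c :: _ => some c.1

-- ===== PORT B =====
def find_most_frequent_tool_index_alt (tools_list : List (List String)) : Option Int :=
  let counter := PySem.Dict.counter ((tools_list.filter (fun sub => !sub.isEmpty)).flatten)
  if PySem.Dict.size counter == 0 then none
  else
    match PySem.List.max? (PySem.Dict.values counter) (fun v => v) with
    | none => none  -- unreachable: counter non-empty here
    | some max_count =>
      ((PySem.List.enumerate tools_list 0).foldl
        (fun st p =>
          if p.2.isEmpty then st
          else
            match PySem.List.max? (p.2.map (fun t => PySem.Dict.getD counter t 0)) (fun v => v) with
            | none => st  -- unreachable: p.2 ≠ []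
            | some m =>
              if m = max_count ∧ st.2 < PySem.List.len p.2 then (some p.1, PySem.List.len p.2)
              else st)
        ((none : Option Int), (-1 : Int))).1

-- ===== PRECONDITION & SPEC =====
def Spec_find_most_frequent_tool_index (tools_list : List (List String)) (out : Option Int) : Prop := out = find_most_frequent_tool_index_alt tools_list
instance (tools_list : List (List String)) (out : Option Int) : Decidable (Spec_find_most_frequent_tool_index tools_list out) := by unfold Spec_find_most_frequent_tool_index; infer_instance

-- ===== CLAIM (what is proved, stated in full; the proofs are below) =====
def Claim_equal_find_most_frequent_tool_index : Prop := ∀ (tools_list : List (List String)), Dom_find_most_frequent_tool_index tools_list → Spec_find_most_frequent_tool_index tools_list (find_most_frequent_tool_index tools_list)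

-- ===== LEMMAS AND PROOFS =====

def pvBefore (a b : Int × Int) : Bool :=
  decide ((-a.2) < (-b.2)) || (!decide ((-b.2) < (-a.2)) && decide (a.1 < b.1))


def pvQQ (ats : List String) (M : Int) : Int × List String → Bool :=
  fun p => !p.2.isEmpty && decide (∃ t ∈ p.2, (ats.count t : Int) = M)

def pvF : Int × List String → Int × Int := fun p => (p.1, (p.2.length : Int))

def pvG : Option Int × Int → Int × List String → Option Int × Int :=
  fun st p => if st.2 < (p.2.length : Int) then (some p.1, (p.2.length : Int)) else st

def pvPick : Int × Int → Int × Int → Int × Int := fun h x => if pvBefore x h then x else h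

-- head of an insertion-sort fold = running minimum (earlier element kept when not strictly before)
theorem pv_foldl_insertBy_head {α : Type} (before : α → α → Bool) (cs : List α) :
    ∀ (y : α) (ys : List α), ∃ t,
      cs.foldl (fun acc x => PySem.List.insertBy before x acc) (y :: ys)
        = (cs.foldl (fun h x => if before x h then x else h) y) :: t := by
  induction cs with
  | nil => intro y ys; exact ⟨ys, rfl⟩
  | cons x cs ih =>
    intro y ys
    by_cases h : before x y = true
    · simpa [List.foldl, PySem.List.insertBy, h] using ih x (y :: ys)
    · have h' : before x y = false := by simpa using h
      simpa [List.foldl, PySem.List.insertBy, h'] using ih y (PySem.List.insertBy before x ys)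

-- running argmax (B's loop) computes the running lex-minimum (head of A's sort)
theorem pv_argmax_fold (es : List (Int × List String)) :
    ∀ (h : Int × Int),
    es.Pairwise (fun a b => a.1 < b.1) → (∀ x ∈ es, h.1 < x.1) →
    es.foldl pvG (some h.1, h.2)
      = (some ((es.map pvF).foldl pvPick h).1, ((es.map pvF).foldl pvPick h).2) := by
  induction es with
  | nil => intro h _ _; rfl
  | cons x es ih =>
    intro h hpw hlt
    have hx : h.1 < x.1 := hlt x (by simp)
    have hb : pvBefore (x.1, (x.2.length : Int)) h = decide (h.2 < (x.2.length : Int)) := by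
      simp [pvBefore]
      omega
    rcases List.pairwise_cons.mp hpw with ⟨hxlt, hpw'⟩
    by_cases hc : h.2 < (x.2.length : Int)
    · simp only [List.foldl_cons, List.map_cons, pvG, pvF, pvPick, hb, hc, decide_true, if_true]
      exact ih (x.1, (x.2.length : Int)) hpw' (fun y hy => hxlt y hy)
    · simp only [List.foldl_cons, List.map_cons, pvG, pvF, pvPick, hb, if_neg hc]
      have hcf : (decide (h.2 < (x.2.length : Int))) = false := by simpa using hc
      rw [hcf]
      simp only [Bool.false_eq_true, if_false]
      exact ih h hpw' (fun y hy => hlt y (by simp [hy]))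

-- A's "some most-common tool occurs in sub" test, as a proposition on counts
theorem pv_qualA (ats : List String) (M : Int) (sub : List String)
    (hmem : ∀ t ∈ sub, t ∈ ats) :
    ((((PySem.Dict.counter ats).items.filter (fun p => p.2 == M)).map (fun p => p.1)).any
        (fun tool => sub.contains tool))
      = decide (∃ t ∈ sub, (ats.count t : Int) = M) := by
  rw [PySem.Dict.items_counter, List.filter_map, List.map_map]
  rw [Bool.eq_iff_iff]
  simp only [List.any_eq_true, List.mem_map, List.mem_filter, Function.comp,
    decide_eq_true_eq, List.contains_eq_mem, PySem.Set.mem_ofList, beq_iff_eq]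
  constructor
  · rintro ⟨t, ⟨ht2, hc⟩⟩
    rcases ht2 with ⟨k, ⟨hk, hM⟩, rfl⟩
    exact ⟨k, hc, hM⟩
  · rintro ⟨t, ht, hM⟩
    exact ⟨t, ⟨t, ⟨hmem t ht, hM⟩, rfl⟩, ht⟩

-- B's per-sublist maximum equals M iff some tool of sub has count M
theorem pv_qualB (ats : List String) (M : Int) (sub : List String) (m : Int)
    (hle : ∀ t ∈ ats, (ats.count t : Int) ≤ M)
    (hmem : ∀ t ∈ sub, t ∈ ats)
    (hm : PySem.List.max? (sub.map (fun t => (PySem.Dict.counter ats).getD t 0)) (fun v => v) = some m) :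
    (m = M) = (∃ t ∈ sub, (ats.count t : Int) = M) := by
  have hget : (sub.map (fun t => (PySem.Dict.counter ats).getD t 0))
      = sub.map (fun t => (ats.count t : Int)) := by
    simp [PySem.Dict.getD_counter]
  rw [hget] at hm
  have hmmem := PySem.List.max?_mem hm
  have hmmax := PySem.List.max?_isMax hm
  simp only [List.mem_map] at hmmem
  rcases hmmem with ⟨t0, ht0, hval⟩
  apply propext
  constructor
  · rintro rfl
    exact ⟨t0, ht0, hval⟩
  · rintro ⟨t, ht, htM⟩
    have h1 : (ats.count t : Int) ≤ m := hmmax _ (List.mem_map.mpr ⟨t, ht, rfl⟩)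
    have h2 : m ≤ M := hval ▸ hle t0 (hmem t0 ht0)
    omega

theorem pv_main (tools_list : List (List String)) :
    find_most_frequent_tool_index tools_list = find_most_frequent_tool_index_alt tools_list := by
  unfold find_most_frequent_tool_index find_most_frequent_tool_index_alt
  by_cases hV : (tools_list.filter (fun s => !s.isEmpty)).isEmpty
  · have hV' : tools_list.filter (fun s => !s.isEmpty) = [] := by simpa using hV
    have h0 : (PySem.Dict.counter ([] : List String)).size = 0 := rfl
    simp [hV', h0]
  · have hVne : tools_list.filter (fun s => !s.isEmpty) ≠ [] := by simpa using hV
    rcases List.exists_cons_of_ne_nil hVne with ⟨s0, Vrest, hVcons⟩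
    have hs0 : s0 ≠ [] ∧ s0 ∈ tools_list := by
      have := List.mem_filter.mp (hVcons ▸ List.mem_cons_self ..)
      refine ⟨by simpa using this.2, this.1⟩
    have hatsne : (tools_list.filter (fun s => !s.isEmpty)).flatten ≠ [] := by
      rw [hVcons]
      rcases List.exists_cons_of_ne_nil hs0.1 with ⟨a, s0t, rfl⟩
      simp
    have hsize : ((PySem.Dict.counter ((tools_list.filter (fun s => !s.isEmpty)).flatten)).size == 0) = false := by
      rcases List.exists_cons_of_ne_nil hatsne with ⟨t0, atst, hats⟩
      have ht0 : t0 ∈ PySem.Set.ofList ((tools_list.filter (fun s => !s.isEmpty)).flatten) := by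
        rw [PySem.Set.mem_ofList, hats]; simp
      have hne := List.ne_nil_of_mem ht0
      simp only [PySem.Dict.size, PySem.Dict.items_counter, List.length_map, beq_eq_false_iff_ne,
        ne_eq, List.length_eq_zero_iff]
      exact hne
    have hVfalse : (tools_list.filter (fun s => !s.isEmpty)).isEmpty = false := by simpa using hV
    simp only [hVfalse, hsize, Bool.false_eq_true, if_false, PySem.List.len_eq]
    have hvals : (PySem.Dict.counter ((tools_list.filter (fun s => !s.isEmpty)).flatten)).values
        = (PySem.Set.ofList ((tools_list.filter (fun s => !s.isEmpty)).flatten)).map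
            (fun k => ((((tools_list.filter (fun s => !s.isEmpty)).flatten).count k : Int))) := by
      simp only [PySem.Dict.values, PySem.Dict.items_counter, List.map_map]
      rfl
    rcases hmax : PySem.List.max? ((PySem.Dict.counter ((tools_list.filter (fun s => !s.isEmpty)).flatten)).values) (fun v => v) with _ | M
    · exfalso
      rw [PySem.List.max?_eq_none_iff, hvals, List.map_eq_nil_iff] at hmax
      rcases List.exists_cons_of_ne_nil hatsne with ⟨t0, atst, hats⟩
      have ht0 : t0 ∈ PySem.Set.ofList ((tools_list.filter (fun s => !s.isEmpty)).flatten) := by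
        rw [PySem.Set.mem_ofList, hats]; simp
      exact List.ne_nil_of_mem ht0 hmax
    · rw [hmax]
      dsimp only
      have hle : ∀ t ∈ (tools_list.filter (fun s => !s.isEmpty)).flatten,
          (((tools_list.filter (fun s => !s.isEmpty)).flatten).count t : Int) ≤ M := by
        intro t ht
        refine PySem.List.max?_isMax hmax _ ?_
        rw [hvals]
        exact List.mem_map.mpr ⟨t, (PySem.Set.mem_ofList _ _).mpr ht, rfl⟩
      have hmemats : ∀ p : Int × List String, p ∈ PySem.List.enumerate tools_list 0 →
          p.2.isEmpty = false → ∀ t ∈ p.2, t ∈ (tools_list.filter (fun s => !s.isEmpty)).flatten := by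
        intro p hp he t ht
        rcases (PySem.List.mem_enumerate_iff _ _ _).mp hp with ⟨k, hk, rfl⟩
        have hmem : tools_list[k] ∈ tools_list.filter (fun s => !s.isEmpty) :=
          List.mem_filter.mpr ⟨List.getElem_mem hk, by simpa using he⟩
        exact List.mem_flatten.mpr ⟨_, hmem, ht⟩
      have hA : (PySem.List.enumerate tools_list 0).foldl
          (fun acc p =>
            if p.2.isEmpty = true then acc
            else
              if ((List.map (fun p => p.1)
                    (List.filter (fun p => p.2 == M)
                      (PySem.Dict.counter ((tools_list.filter (fun sublist => !sublist.isEmpty)).flatten)).items)).any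
                  fun tool => p.2.contains tool) = true then acc ++ [(p.1, (p.2.length : Int))]
              else acc) []
          = ((PySem.List.enumerate tools_list 0).filter
                (pvQQ ((tools_list.filter (fun s => !s.isEmpty)).flatten) M)).map pvF := by
        rw [PySem.List.foldl_congr_mem _ _
            (fun acc p => if pvQQ ((tools_list.filter (fun s => !s.isEmpty)).flatten) M p = true
              then acc ++ [pvF p] else acc) []
            ?_]
        · rw [PySem.List.foldl_append_if, List.nil_append]
        · intro acc p hp
          by_cases he : p.2.isEmpty
          · simp [he, pvQQ]
          · have he' : p.2.isEmpty = false := by simpa using he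
            simp only [he', Bool.false_eq_true, if_false, pvQQ, Bool.not_false, Bool.true_and, pvF]
            rw [pv_qualA _ M p.2 (hmemats p hp he')]
      have hB : (PySem.List.enumerate tools_list 0).foldl
          (fun st p =>
            if p.2.isEmpty = true then st
            else
              match PySem.List.max?
                  (List.map (fun t =>
                    (PySem.Dict.counter ((tools_list.filter (fun sub => !sub.isEmpty)).flatten)).getD t 0) p.2)
                  (fun v => v) with
              | none => st
              | some m => if m = M ∧ st.2 < (p.2.length : Int) then (some p.1, (p.2.length : Int)) else st)
          ((none : Option Int), (-1 : Int))
          = (((PySem.List.enumerate tools_list 0).filter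
                (pvQQ ((tools_list.filter (fun s => !s.isEmpty)).flatten) M)).foldl pvG
              ((none : Option Int), (-1 : Int))) := by
        rw [PySem.List.foldl_congr_mem _ _
            (fun st p => if pvQQ ((tools_list.filter (fun s => !s.isEmpty)).flatten) M p = true
              then pvG st p else st)
            ((none : Option Int), (-1 : Int)) ?_]
        · rw [PySem.List.foldl_if_eq_foldl_filter]
        · intro st p hp
          by_cases he : p.2.isEmpty
          · simp [he, pvQQ]
          · have he' : p.2.isEmpty = false := by simpa using he
            have hpne : p.2 ≠ [] := by simpa using he'
            rcases hm : PySem.List.max?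
                (List.map (fun t =>
                  (PySem.Dict.counter ((tools_list.filter (fun sub => !sub.isEmpty)).flatten)).getD t 0) p.2)
                (fun v => v) with _ | m
            · rw [PySem.List.max?_eq_none_iff, List.map_eq_nil_iff] at hm
              exact absurd hm hpne
            · simp only [he', Bool.false_eq_true, if_false, hm]
              simp only [pv_qualB _ M p.2 m hle (hmemats p hp he') hm]
              simp only [pvQQ, he', Bool.not_false, Bool.true_and, pvG]
              by_cases hq : ∃ t ∈ p.2,
                  (((tools_list.filter (fun s => !s.isEmpty)).flatten).count t : Int) = M
              · simp [hq]
              · simp [hq]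
      rw [hA, hB]
      have hMmem := PySem.List.max?_mem hmax
      rw [hvals] at hMmem
      rcases List.mem_map.mp hMmem with ⟨tstar, htsmem, htsval⟩
      rw [PySem.Set.mem_ofList] at htsmem
      rcases List.mem_flatten.mp htsmem with ⟨sub, hsubV, htssub⟩
      have hsubP := List.mem_filter.mp hsubV
      rcases List.mem_iff_getElem.mp hsubP.1 with ⟨k, hk, hksub⟩
      have hpmem : ((k : Int), sub) ∈ PySem.List.enumerate tools_list 0 := by
        rw [PySem.List.mem_enumerate_iff]
        exact ⟨k, hk, by simp [hksub]⟩
      have hqq : pvQQ ((tools_list.filter (fun s => !s.isEmpty)).flatten) M ((k : Int), sub) = true := by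
        have hsne : sub.isEmpty = false := by simpa using hsubP.2
        simp only [pvQQ, hsne, Bool.not_false, Bool.true_and, decide_eq_true_eq]
        exact ⟨tstar, htssub, htsval⟩
      have hesne : (PySem.List.enumerate tools_list 0).filter
          (pvQQ ((tools_list.filter (fun s => !s.isEmpty)).flatten) M) ≠ [] :=
        List.ne_nil_of_mem (List.mem_filter.mpr ⟨hpmem, hqq⟩)
      rcases List.exists_cons_of_ne_nil hesne with ⟨e0, tes, hes⟩
      have hpwes := (PySem.List.pairwise_lt_enumerate tools_list 0).filter
        (pvQQ ((tools_list.filter (fun s => !s.isEmpty)).flatten) M)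
      rw [hes] at hpwes
      rcases List.pairwise_cons.mp hpwes with ⟨he0lt, hpwtes⟩
      rw [hes]
      have hg0 : pvG ((none : Option Int), (-1 : Int)) e0 = (some (pvF e0).1, (pvF e0).2) := by
        have hpos : (-1 : Int) < (e0.2.length : Int) := by
          have h0 : (0:Int) ≤ (e0.2.length : Int) := by positivity
          omega
        simp [pvG, pvF, hpos]
      rw [List.foldl_cons, hg0, pv_argmax_fold tes (pvF e0) hpwtes (fun x hx => he0lt x hx)]
      obtain ⟨tl, htl⟩ := pv_foldl_insertBy_head pvBefore (tes.map pvF) (pvF e0) []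
      simp only [List.map_cons, List.isEmpty_cons, Bool.false_eq_true, if_false,
        PySem.List.sorted2, List.foldl_cons]
      have hBe : (fun a b : Int × Int => decide (-a.2 < -b.2) || !decide (-b.2 < -a.2) && decide (a.1 < b.1)) = pvBefore := rfl
      have h1 : PySem.List.insertBy pvBefore (pvF e0) [] = [pvF e0] := rfl
      rw [hBe, h1, htl]
      rfl

-- ===== VERDICT (by name: the statement is the Claim_ definition above) =====
theorem find_most_frequent_tool_index_spec : Claim_equal_find_most_frequent_tool_index := by
  intro tools_list _
  unfold Spec_find_most_frequent_tool_index
  exact pv_main tools_list
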